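-- pv_equiv track=rewrite | github.com/Vsevalot/railroads | kniga_1_reader.py | split_railroad_parts
-- ===== SOURCE A (Python) =====
-- from typing import List, Tuple
--
-- def split_railroad_parts(parts_table: List[List[str]]) -> List[List[List[str]]]:
--     parts = []
--     part_first = 0  # First line of a part
--     for i in range(len(parts_table)):
--         if parts_table[i][0] == "nan":
--             parts.append(parts_table[part_first: i])
--             part_first = i + 1
--     return parts
-- ===== SOURCE B (Python) =====
-- from typing import List
--
-- def split_railroad_parts(parts_table: List[List[str]]) -> List[List[List[str]]]:
--     parts = []
--     current = []
--     for row in parts_table: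
--         if row[0] == "nan":
--             parts.append(current)
--             current = []
--         else:
--             current.append(row)
--     return parts
-- ===== Notes on version B (the rewrite author's own statement) =====
-- stated objective: simpler
-- what changed: Replaces index arithmetic and re-slicing of the table with a single pass that grows the current part incrementally and flushes it at each 'nan' delimiter row (the trailing segment is still dropped, as in A).
import Mathlib
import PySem

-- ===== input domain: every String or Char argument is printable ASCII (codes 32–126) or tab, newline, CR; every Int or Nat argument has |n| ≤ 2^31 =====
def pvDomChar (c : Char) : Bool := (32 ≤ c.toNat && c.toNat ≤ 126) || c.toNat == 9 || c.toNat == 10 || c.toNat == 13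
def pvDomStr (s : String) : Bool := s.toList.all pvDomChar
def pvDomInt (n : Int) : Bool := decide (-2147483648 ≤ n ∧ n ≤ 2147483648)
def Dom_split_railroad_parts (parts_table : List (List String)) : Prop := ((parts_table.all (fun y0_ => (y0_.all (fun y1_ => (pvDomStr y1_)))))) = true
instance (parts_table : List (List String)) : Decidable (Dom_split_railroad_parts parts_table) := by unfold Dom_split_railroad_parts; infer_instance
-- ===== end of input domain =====

-- B replaces A's index arithmetic and slicing with a single pass growing the current part
-- incrementally (objective: simpler); equivalence proved on tables whose rows are all nonempty.


-- ===== PORT A =====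
-- loop body of A: state = (parts, part_first); parts_table[i][0] via pyGetD (safe under Pre_)
def pvStepA (parts_table : List (List String))
    (st : List (List (List String)) × Int) (i : Int) :
    List (List (List String)) × Int :=
  if PySem.List.pyGetD (PySem.List.pyGetD parts_table i []) 0 "" = "nan" then
    (st.1 ++ [PySem.List.slice parts_table (some st.2) (some i)], i + 1)
  else st

def split_railroad_parts (parts_table : List (List String)) : List (List (List String)) :=
  ((PySem.List.pyRange 0 parts_table.length 1).foldl (pvStepA parts_table) ([], 0)).1

-- ===== PORT B =====
-- loop body of B: state = (parts, current)
def pvStepB (st : List (List (List String)) × List (List String)) (row : List String) :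
    List (List (List String)) × List (List String) :=
  if PySem.List.pyGetD row 0 "" = "nan" then (st.1 ++ [st.2], [])
  else (st.1, st.2 ++ [row])

def split_railroad_parts_alt (parts_table : List (List String)) : List (List (List String)) :=
  (parts_table.foldl pvStepB ([], [])).1

-- ===== PRECONDITION & SPEC =====
-- Pre_ excludes exactly the inputs on which the Python A raises IndexError (an empty row:
-- parts_table[i][0] fails); B raises there too.
def Pre_split_railroad_parts (parts_table : List (List String)) : Prop :=
  ∀ r ∈ parts_table, r ≠ []
instance (parts_table : List (List String)) : Decidable (Pre_split_railroad_parts parts_table) := by unfold Pre_split_railroad_parts; infer_instance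
def pvWitness_split_railroad_parts : List (List String) :=
  [["a", "b"], ["nan"], ["c"], ["nan"], ["d"]]
def Spec_split_railroad_parts (parts_table : List (List String)) (out : List (List (List String))) : Prop := out = split_railroad_parts_alt parts_table
instance (parts_table : List (List String)) (out : List (List (List String))) : Decidable (Spec_split_railroad_parts parts_table out) := by unfold Spec_split_railroad_parts; infer_instance

-- ===== CLAIM (what is proved, stated in full; the proofs are below) =====
def Claim_equal_split_railroad_parts : Prop := ∀ (parts_table : List (List String)), Dom_split_railroad_parts parts_table → Pre_split_railroad_parts parts_table → Spec_split_railroad_parts parts_table (split_railroad_parts parts_table)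

-- ===== LEMMAS AND PROOFS =====

-- The two loops in lock-step: A's state (parts, part_first = pf) at index j corresponds to
-- B's state (parts, current = parts_table[pf:j]); induction on the remaining length.
theorem pv_loop_eq (t : List (List String)) :
    ∀ (m j : Nat), m = t.length - j → j ≤ t.length →
    ∀ (parts : List (List (List String))) (pf : Nat), pf ≤ j →
    ((PySem.List.pyRange (j : Int) (t.length : Int) 1).foldl (pvStepA t) (parts, (pf : Int))).1
      = ((t.drop j).foldl pvStepB (parts, (t.drop pf).take (j - pf))).1 := by
  intro m
  induction m with
  | zero =>
      intro j hm hj parts pf hpf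
      have hje : j = t.length := by omega
      subst hje
      simp
  | succ m ih =>
      intro j hm hj parts pf hpf
      have hjlt : j < t.length := by omega
      have hcons : PySem.List.pyRange (j : Int) (t.length : Int) 1
          = (j : Int) :: PySem.List.pyRange ((j : Int) + 1) (t.length : Int) 1 :=
        PySem.List.pyRange_one_cons (by exact_mod_cast hjlt)
      have hdrop : t.drop j = t[j] :: t.drop (j + 1) := List.drop_eq_getElem_cons hjlt
      have hgetA : PySem.List.pyGetD t (j : Int) [] = t[j] := by
        simp [PySem.List.pyGetD_natCast, List.getD_eq_getElem?_getD, hjlt]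
      rw [hcons, hdrop]
      simp only [List.foldl_cons]
      by_cases hnan : PySem.List.pyGetD t[j] 0 "" = "nan"
      · -- delimiter row: A appends the slice, B flushes current
        have hslice : PySem.List.slice t (some (pf : Int)) (some (j : Int))
            = (t.drop pf).take (j - pf) := PySem.List.slice_natCast t pf j
        have hA : pvStepA t (parts, (pf : Int)) (j : Int)
            = (parts ++ [(t.drop pf).take (j - pf)], (j : Int) + 1) := by
          simp [pvStepA, hgetA, hnan, hslice]
        have hB : pvStepB (parts, (t.drop pf).take (j - pf)) t[j]
            = (parts ++ [(t.drop pf).take (j - pf)], []) := by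
          simp [pvStepB, hnan]
        rw [hA, hB]
        have : ((j : Int) + 1) = ((j + 1 : Nat) : Int) := by push_cast; ring
        rw [this]
        have := ih (j + 1) (by omega) (by omega)
          (parts ++ [(t.drop pf).take (j - pf)]) (j + 1) (by omega)
        simpa using this
      · -- ordinary row: A keeps state, B grows current
        have hA : pvStepA t (parts, (pf : Int)) (j : Int) = (parts, (pf : Int)) := by
          simp [pvStepA, hgetA, hnan]
        have hB : pvStepB (parts, (t.drop pf).take (j - pf)) t[j]
            = (parts, (t.drop pf).take (j - pf) ++ [t[j]]) := by
          simp [pvStepB, hnan]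
        rw [hA, hB]
        have hcur : (t.drop pf).take (j + 1 - pf) = (t.drop pf).take (j - pf) ++ [t[j]] := by
          have h1 : j + 1 - pf = (j - pf) + 1 := by omega
          have h2 : (t.drop pf)[j - pf]? = some t[j] := by
            rw [List.getElem?_drop]
            have : pf + (j - pf) = j := by omega
            rw [this]
            exact List.getElem?_eq_getElem hjlt
          rw [h1, List.take_succ, h2]
          simp
        have := ih (j + 1) (by omega) (by omega) parts pf (by omega)
        rw [hcur] at this
        have hcast : ((j + 1 : Nat) : Int) = (j : Int) + 1 := by push_cast; ring
        rw [hcast] at this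
        exact this

-- ===== VERDICT (by name: the statement is the Claim_ definition above) =====
theorem split_railroad_parts_spec : Claim_equal_split_railroad_parts := by
  intro t _ _
  unfold Spec_split_railroad_parts split_railroad_parts split_railroad_parts_alt
  have h := pv_loop_eq t t.length 0 (by omega) (by omega) [] 0 (by omega)
  simpa using h
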